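-- pv_equiv track=rewrite | github.com/MrChepe09/Competitive-Programming-Codes | A2OJ/Ladder 0-1300/petr_and_book.py | petrbook
-- ===== SOURCE A (Python) =====
-- def petrbook(n, a):
--     total = 0
--     i = 0
--     while(total<n):
--         if(i==7):
--             i = 0
--         total += a[i]
--         i+=1
--     return i
-- ===== SOURCE B (Python) =====
-- def petrbook(n, a):
--     # Scan one week for an early finish, then jump over the full weeks with a
--     # ceiling division and locate the finishing day in a second scan.
--     if n <= 0:
--         return 0
--     week = a[:7]
--     total = 0
--     day = 0
--     best = None
--     for x in week:
--         day += 1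
--         total += x
--         if total >= n:
--             return day
--         if best is None or best < total:
--             best = total
--     s = total
--     weeks = (n - best + s - 1) // s
--     target = n - weeks * s
--     running = 0
--     day = 1
--     for x in week:
--         running += x
--         if running >= target:
--             return day
--         day += 1
-- ===== Notes on version B (the rewrite author's own statement) =====
-- stated objective: alternative
-- what changed: Instead of simulating every day until the page total reaches n, B scans a single week, computes the number of full weeks to skip with one ceiling division, and finds the finishing weekday in one more 7-element scan.
import Mathlib
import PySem

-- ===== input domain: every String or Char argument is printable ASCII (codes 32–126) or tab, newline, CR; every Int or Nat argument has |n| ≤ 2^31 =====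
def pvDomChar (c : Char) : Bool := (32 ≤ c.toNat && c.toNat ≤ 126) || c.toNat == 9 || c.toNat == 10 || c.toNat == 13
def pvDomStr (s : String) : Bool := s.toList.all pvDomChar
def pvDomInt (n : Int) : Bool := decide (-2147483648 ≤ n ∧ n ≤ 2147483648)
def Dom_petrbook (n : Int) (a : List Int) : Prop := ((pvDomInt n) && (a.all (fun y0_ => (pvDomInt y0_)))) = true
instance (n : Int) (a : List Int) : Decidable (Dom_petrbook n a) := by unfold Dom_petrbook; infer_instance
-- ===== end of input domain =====

-- B replaces A's day-by-day simulation by one week scan, a ceiling division over the full weeks, and a second week scan; equivalence is about the return value (neither mutates its arguments).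

-- ===== PORT A =====
-- A's while loop, transliterated with a fuel guard that only makes the recursion total;
-- under Pre_petrbook the fuel is never exhausted (the loop runs at most 7*(m0+2) ≤ fuel steps).
def petrbookLoop (n : Int) (a : List Int) : Int → Int → Nat → Int
  | _,     i, 0            => i                      -- fuel guard only; unreachable under Pre_petrbook
  | total, i, Nat.succ fuel =>
      if total < n then
        let i' := if i == 7 then 0 else i            -- if(i==7): i = 0
        match PySem.List.pyGet? a i' with            -- total += a[i]
        | none   => i' + 1                           -- IndexError; unreachable under Pre_petrbook
        | some x => petrbookLoop n a (total + x) (i' + 1) fuel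
      else i

def petrbook (n : Int) (a : List Int) : Int :=
  petrbookLoop n a 0 0 (7 * (n.toNat + 2))

-- ===== PORT B =====
-- first scan: early finish day, or (week total, max running total)
def bScan1 (n : Int) : List Int → Int → Int → Option Int → Sum (Int × Option Int) Int
  | [],      total, _,   best => Sum.inl (total, best)
  | x :: xs, total, day, best =>
      let day' := day + 1
      let total' := total + x
      if n ≤ total' then Sum.inr day'
      else bScan1 n xs total' day'
             (match best with
              | none => some total'
              | some b => if b < total' then some total' else some b)

-- second scan: first day whose running total reaches target
def bScan2 (target : Int) : List Int → Int → Int → Option Int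
  | [],      _,       _   => none
  | x :: xs, running, day =>
      let running' := running + x
      if target ≤ running' then some day else bScan2 target xs running' (day + 1)

def petrbook_alt (n : Int) (a : List Int) : Int :=
  if n ≤ 0 then 0
  else
    let week := a.take 7                             -- a[:7]
    match bScan1 n week 0 0 none with
    | Sum.inr day => day
    | Sum.inl (s, best?) =>
        let best := best?.getD 0                     -- best is None only outside Pre_petrbook
        let weeks := PySem.Int.floordiv (n - best + s - 1) s
        let target := n - weeks * s
        (bScan2 target week 0 1).getD 0              -- the scan always finds a day under Pre_petrbook

-- ===== PRECONDITION & SPEC =====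
-- Pre_ is exactly the set of inputs on which A returns: either n ≤ 0 (A answers 0 at once),
-- or the running total reaches n within the first week before any out-of-range index,
-- or the list has a full week whose total is positive (so the total eventually reaches n).
-- Outside Pre_ A raises IndexError (fewer than 7 pages-per-day values and no early finish)
-- or loops forever (weekly total ≤ 0 and no early finish).
def Pre_petrbook (n : Int) (a : List Int) : Prop :=
  n ≤ 0
    ∨ (∃ j < min a.length 7, n ≤ (((a.take 7).take (j + 1)).sum : Int))
    ∨ (7 ≤ a.length ∧ 0 < ((a.take 7).sum : Int))
instance (n : Int) (a : List Int) : Decidable (Pre_petrbook n a) := by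
  unfold Pre_petrbook; infer_instance

def pvWitness_petrbook : Int × List Int := (5, [1, 1, 1, 1, 1, 1, 1])

def Spec_petrbook (n : Int) (a : List Int) (out : Int) : Prop := out = petrbook_alt n a
instance (n : Int) (a : List Int) (out : Int) : Decidable (Spec_petrbook n a out) := by
  unfold Spec_petrbook; infer_instance

-- ===== CLAIM (what is proved, stated in full; the proofs are below) =====
def Claim_equal_petrbook : Prop :=
  ∀ (n : Int) (a : List Int), Dom_petrbook n a → Pre_petrbook n a → Spec_petrbook n a (petrbook n a)

-- ===== LEMMAS AND PROOFS =====

-- running prefix totals of a week starting from a given total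
def psums (total : Int) : List Int → List Int
  | []      => []
  | x :: xs => (total + x) :: psums (total + x) xs

-- first day (1-based offset `day`) whose running total reaches n
def hit? (n : Int) : List Int → Int → Int → Option Int
  | [],      _,     _   => none
  | x :: xs, total, day =>
      if n ≤ total + x then some day else hit? n xs (total + x) (day + 1)

def foldMax (b : Option Int) (l : List Int) : Option Int :=
  l.foldl (fun b p => match b with
                      | none => some p
                      | some v => if v < p then some p else some v) b

lemma psums_mem_iff (xs : List Int) : ∀ (total p : Int),
    p ∈ psums total xs ↔ ∃ j < xs.length, p = total + (xs.take (j + 1)).sum := by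
  induction xs with
  | nil => simp [psums]
  | cons x xs ih =>
      intro total p
      simp only [psums, List.mem_cons, ih (total + x)]
      constructor
      · rintro (rfl | ⟨j, hj, rfl⟩)
        · exact ⟨0, by simp, by simp⟩
        · exact ⟨j + 1, by simpa using hj, by simp [List.take_succ_cons]; ring⟩
      · rintro ⟨j, hj, rfl⟩
        cases j with
        | zero => left; simp
        | succ j =>
            right
            exact ⟨j, by simpa using hj, by simp [List.take_succ_cons]; ring⟩

lemma psums_last_mem (xs : List Int) : ∀ total, xs ≠ [] → total + xs.sum ∈ psums total xs := by
  induction xs with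
  | nil => simp
  | cons x xs ih =>
      intro total _
      cases xs with
      | nil => simp [psums]
      | cons y ys =>
          simp only [psums, List.mem_cons, List.sum_cons]
          right
          have h := ih (total + x) (by simp)
          simp only [List.sum_cons] at h
          have e : total + (x + (y + ys.sum)) = total + x + (y + ys.sum) := by ring
          rw [e]
          simpa only [psums, List.mem_cons, List.sum_cons] using h

lemma hit?_none_iff (n : Int) (xs : List Int) : ∀ total day,
    hit? n xs total day = none ↔ ∀ p ∈ psums total xs, p < n := by
  induction xs with
  | nil => intro total day; simp [hit?, psums]
  | cons x xs ih =>
      intro total day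
      simp only [hit?, psums, List.mem_cons]
      split_ifs with h
      · constructor
        · intro hc; exact absurd hc (by simp)
        · intro hall; exact absurd (hall _ (Or.inl rfl)) (by omega)
      · rw [ih (total + x) (day + 1)]
        constructor
        · rintro hall p (rfl | hp)
          · omega
          · exact hall p hp
        · intro hall p hp; exact hall p (Or.inr hp)

lemma hit?_shift (n c : Int) (xs : List Int) : ∀ total day,
    hit? n xs total day = hit? (n - c) xs (total - c) day := by
  induction xs with
  | nil => intro _ _; simp [hit?]
  | cons x xs ih =>
      intro total day
      have e : (n - c ≤ total - c + x) ↔ (n ≤ total + x) := by omega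
      simp only [hit?, e]
      split_ifs with h
      · rfl
      · rw [show total - c + x = total + x - c by ring]
        exact ih (total + x) (day + 1)

lemma hit?_isSome_of_mem (n : Int) (xs : List Int) : ∀ total day p, p ∈ psums total xs → n ≤ p →
    ∃ d, hit? n xs total day = some d := by
  induction xs with
  | nil => simp [psums]
  | cons x xs ih =>
      intro total day p hp hn
      simp only [psums, List.mem_cons] at hp
      simp only [hit?]
      split_ifs with h
      · exact ⟨day, rfl⟩
      · rcases hp with rfl | hp
        · omega
        · exact ih (total + x) (day + 1) p hp hn

lemma foldMax_some (l : List Int) : ∀ v, foldMax (some v) l = some (l.foldl max v) := by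
  induction l with
  | nil => intro v; simp [foldMax]
  | cons x xs ih =>
      intro v
      simp only [foldMax, List.foldl_cons] at *
      rw [show (if v < x then some x else some v) = some (max v x) by
        split_ifs with h
        · rw [max_eq_right h.le]
        · rw [max_eq_left (not_lt.mp h)]]
      exact ih (max v x)

lemma foldl_max_le (l : List Int) : ∀ v, v ≤ l.foldl max v ∧ ∀ x ∈ l, x ≤ l.foldl max v := by
  induction l with
  | nil => simp
  | cons y ys ih =>
      intro v
      obtain ⟨h1, h2⟩ := ih (max v y)
      refine ⟨?_, fun x hx => ?_⟩
      · simp only [List.foldl_cons]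
        exact le_trans (le_max_left v y) h1
      · simp only [List.foldl_cons]
        rcases List.mem_cons.mp hx with rfl | hx
        · exact le_trans (le_max_right v x) h1
        · exact h2 x hx

lemma foldl_max_mem (l : List Int) : ∀ v, l.foldl max v = v ∨ l.foldl max v ∈ l := by
  induction l with
  | nil => simp
  | cons y ys ih =>
      intro v
      rcases ih (max v y) with h | h
      · rcases le_total y v with hvy | hvy
        · left
          rw [List.foldl_cons, max_eq_left hvy]
          rw [max_eq_left hvy] at h
          exact h
        · right
          rw [List.foldl_cons, h, max_eq_right hvy]
          exact List.mem_cons_self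
      · right
        rw [List.foldl_cons]
        exact List.mem_cons_of_mem _ h

lemma bScan1_eq (n : Int) (xs : List Int) : ∀ total day best,
    bScan1 n xs total day best =
      match hit? n xs total (day + 1) with
      | some d => Sum.inr d
      | none => Sum.inl (total + xs.sum, foldMax best (psums total xs)) := by
  induction xs with
  | nil => intro total day best; simp [bScan1, hit?, psums, foldMax]
  | cons x xs ih =>
      intro total day best
      simp only [bScan1, hit?, psums]
      split_ifs with h
      · rfl
      · rw [ih (total + x) (day + 1)]
        have hd : day + 1 + 1 = day + 2 := by ring
        simp only [hd, foldMax, List.foldl_cons, List.sum_cons, add_assoc]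

lemma bScan2_eq_hit? (t : Int) (xs : List Int) : ∀ running day,
    bScan2 t xs running day = hit? t xs running day := by
  induction xs with
  | nil => intro _ _; rfl
  | cons x xs ih =>
      intro running day
      simp only [bScan2, hit?]
      split_ifs <;> [rfl; exact ih (running + x) (day + 1)]

lemma loop_exit (n : Int) (a : List Int) (total i : Int) (fuel : Nat) (h : ¬ total < n) :
    petrbookLoop n a total i fuel = i := by
  cases fuel <;> simp [petrbookLoop, h]

lemma loop7to0 (n : Int) (a : List Int) (total : Int) (f : Nat) (h : total < n) :
    petrbookLoop n a total 7 (f + 1) = petrbookLoop n a total 0 (f + 1) := by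
  simp [petrbookLoop, h]

lemma loop_week (n : Int) (a : List Int) (xs : List Int) : ∀ (j : Nat) (total : Int) (fuel : Nat),
    xs = (a.take 7).drop j → j + xs.length = (a.take 7).length → xs.length ≤ fuel → total < n →
    petrbookLoop n a total (j : Int) fuel =
      match hit? n xs total ((j : Int) + 1) with
      | some d => d
      | none => petrbookLoop n a (total + xs.sum) (((a.take 7).length : Nat) : Int) (fuel - xs.length) := by
  induction xs with
  | nil =>
      intro j total fuel hdrop hlen _ _
      simp only [List.length_nil, Nat.add_zero] at hlen
      subst hlen
      simp [hit?]
  | cons x xs ih =>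
      intro j total fuel hdrop hlen hfuel htot
      have hjlt : j < (a.take 7).length := by
        simp only [List.length_cons] at hlen; omega
      have hj7 : j < 7 := by
        have := List.length_take_le 7 a
        omega
      obtain ⟨f, rfl⟩ : ∃ f, fuel = f + 1 := by
        cases fuel with
        | zero => simp at hfuel
        | succ f => exact ⟨f, rfl⟩
      have hget : PySem.List.pyGet? a ((j : Nat) : Int) = some x := by
        rw [PySem.List.pyGet?_natCast]
        have h1 : (a.take 7)[j]? = some x := by
          rw [← List.head?_drop, ← hdrop]; rfl
        rw [List.getElem?_take] at h1
        simpa [hj7] using h1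
      have hne7 : ((j : Int) == 7) = false := by
        simp only [beq_eq_false_iff_ne]; omega
      have hxs : xs = (a.take 7).drop (j + 1) := by
        rw [← List.tail_drop, ← hdrop]
        rfl
      simp only [petrbookLoop, if_pos htot, hne7, Bool.false_eq_true, if_false, hget]
      by_cases hhit : n ≤ total + x
      · simp only [hit?, if_pos hhit]
        exact loop_exit n a (total + x) ((j : Int) + 1) f (by omega)
      · have hih := ih (j + 1) (total + x) f hxs (by simp at hlen ⊢; omega)
          (by simp at hfuel ⊢; omega) (by omega)
        push_cast at hih
        rw [hih]
        simp only [hit?, if_neg hhit, List.sum_cons, List.length_cons]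
        have he1 : total + (x + xs.sum) = total + x + xs.sum := by ring
        have he3 : f + 1 - (xs.length + 1) = f - xs.length := by omega
        rw [he1, he3]

lemma weeks_bounds (n M s : Int) (hs : 0 < s) (hsM : s ≤ M) (hMn : M < n) :
    1 ≤ PySem.Int.floordiv (n - M + s - 1) s ∧
    n ≤ PySem.Int.floordiv (n - M + s - 1) s * s + M ∧
    (PySem.Int.floordiv (n - M + s - 1) s - 1) * s + M < n ∧
    PySem.Int.floordiv (n - M + s - 1) s ≤ n - 1 := by
  rw [PySem.Int.floordiv_eq_ediv_of_pos hs]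
  set x := n - M + s - 1 with hx
  set q := x / s with hq
  have hmod : s * q + x % s = x := Int.mul_ediv_add_emod x s
  have hr0 : 0 ≤ x % s := Int.emod_nonneg x (by omega)
  have hr1 : x % s < s := Int.emod_lt_of_pos x hs
  have h1 : n - M ≤ s * q := by omega
  have h2 : s * q ≤ x := by omega
  have hq1 : 1 ≤ q := by
    by_cases h : 1 ≤ q
    · exact h
    · have hq0 : q ≤ 0 := by omega
      have : s * q ≤ s * 0 := mul_le_mul_of_nonneg_left hq0 hs.le
      omega
  have h3 : 0 ≤ (s - 1) * q := mul_nonneg (by omega) (by omega)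
  have hub : q ≤ n - 1 := by nlinarith
  refine ⟨hq1, by nlinarith, by nlinarith, hub⟩

lemma loop_chain (n : Int) (a : List Int) (hlen7 : (a.take 7).length = 7) :
    ∀ (m : Nat) (total : Int) (fuel : Nat), 7 * (m + 1) ≤ fuel → total < n →
      (∀ k : Nat, k < m → hit? n (a.take 7) (total + (k : Int) * (a.take 7).sum) 1 = none) →
      petrbookLoop n a total 0 fuel =
        petrbookLoop n a (total + (m : Int) * (a.take 7).sum) 0 (fuel - 7 * m) := by
  intro m
  induction m with
  | zero => intro total fuel _ _ _; simp
  | succ m ih =>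
      intro total fuel hfuel htot hnone
      have h0 : hit? n (a.take 7) total 1 = none := by
        have := hnone 0 (by omega); simpa using this
      have hweek := loop_week n a (a.take 7) 0 total fuel (by simp) (by simp)
        (by omega) htot
      simp only [Nat.cast_zero, zero_add] at hweek
      rw [h0] at hweek
      have hts : total + (a.take 7).sum < n := by
        have hmem := psums_last_mem (a.take 7) total
          (by intro h; rw [h] at hlen7; simp at hlen7)
        exact (hit?_none_iff n (a.take 7) total 1).mp h0 _ hmem
      obtain ⟨f, hf⟩ : ∃ f, fuel - (a.take 7).length = f + 1 := ⟨fuel - (a.take 7).length - 1, by omega⟩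
      rw [hweek, hlen7]
      rw [show (((7:Nat)):Int) = (7:Int) by norm_num]
      rw [hlen7] at hf
      rw [hf, loop7to0 n a (total + (a.take 7).sum) f hts, ← hf]
      have hih := ih (total + (a.take 7).sum) (fuel - 7) (by omega) hts ?_
      · rw [hih]
        have e1 : total + (a.take 7).sum + (m : Int) * (a.take 7).sum
            = total + ((m + 1 : Nat) : Int) * (a.take 7).sum := by push_cast; ring
        have e2 : fuel - 7 - 7 * m = fuel - 7 * (m + 1) := by omega
        rw [e1, e2]
      · intro k hk
        have h := hnone (k + 1) (by omega)
        have e : total + ((k : Int) + 1) * (a.take 7).sum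
            = total + (a.take 7).sum + (k : Int) * (a.take 7).sum := by ring
        push_cast at h
        rw [e] at h
        exact h

lemma main_eq (n : Int) (a : List Int) (hpre : Pre_petrbook n a) :
    petrbook n a = petrbook_alt n a := by
  by_cases hn : n ≤ 0
  · unfold petrbook petrbook_alt
    rw [if_pos hn]
    exact loop_exit n a 0 0 _ (by omega)
  have hn' : 0 < n := by omega
  have hd1 := bScan1_eq n (a.take 7) 0 0 none
  rw [show ((0:Int) + 1) = 1 by norm_num] at hd1
  cases hhit : hit? n (a.take 7) 0 1 with
  | some d =>
      rw [hhit] at hd1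
      have hA := loop_week n a (a.take 7) 0 0 (7 * (n.toNat + 2)) (by simp) (by simp)
        (by have := List.length_take_le 7 a; omega) (by omega)
      simp only [Nat.cast_zero, zero_add] at hA
      rw [hhit] at hA
      unfold petrbook petrbook_alt
      rw [if_neg hn]
      simp only [hd1]
      exact hA
  | none =>
      have hall : ∀ p ∈ psums 0 (a.take 7), p < n := (hit?_none_iff _ _ _ _).mp hhit
      have h7 : 7 ≤ a.length ∧ 0 < (a.take 7).sum := by
        rcases hpre with h | h | h
        · omega
        · exfalso
          obtain ⟨j, hj, hjn⟩ := h
          have hjw : j < (a.take 7).length := by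
            simp only [List.length_take]; omega
          have hmem : (0 : Int) + ((a.take 7).take (j + 1)).sum ∈ psums 0 (a.take 7) :=
            (psums_mem_iff _ _ _).mpr ⟨j, hjw, rfl⟩
          have := hall _ hmem
          omega
        · exact h
      obtain ⟨hlen, hs⟩ := h7
      have hlen7 : (a.take 7).length = 7 := by
        simp only [List.length_take]; omega
      have hwne : a.take 7 ≠ [] := by
        intro h; rw [h] at hlen7; simp at hlen7
      obtain ⟨c, rest, hwc⟩ := List.exists_cons_of_ne_nil hwne
      obtain ⟨p0, ps, hPc⟩ : ∃ p0 ps, psums 0 (a.take 7) = p0 :: ps := by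
        rw [hwc]; exact ⟨_, _, rfl⟩
      have hfold : foldMax none (psums 0 (a.take 7)) = some (ps.foldl max p0) := by
        rw [hPc, show foldMax none (p0 :: ps) = foldMax (some p0) ps from rfl, foldMax_some]
      set M := ps.foldl max p0 with hM
      have hMmem : M ∈ psums 0 (a.take 7) := by
        rw [hPc]
        rcases foldl_max_mem ps p0 with h | h
        · rw [hM, h]; exact List.mem_cons_self
        · exact List.mem_cons_of_mem _ h
      have hMub : ∀ p ∈ psums 0 (a.take 7), p ≤ M := by
        intro p hp
        rw [hPc] at hp
        rcases List.mem_cons.mp hp with rfl | hp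
        · exact (foldl_max_le ps p).1
        · exact (foldl_max_le ps p0).2 p hp
      have hMn : M < n := hall M hMmem
      have hsum_mem : (0 : Int) + (a.take 7).sum ∈ psums 0 (a.take 7) :=
        psums_last_mem _ 0 hwne
      have hsM : (a.take 7).sum ≤ M := by
        have := hMub _ hsum_mem; omega
      obtain ⟨hq1, hqn, hqprev, hqub⟩ := weeks_bounds n M (a.take 7).sum hs hsM hMn
      set q := PySem.Int.floordiv (n - M + (a.take 7).sum - 1) (a.take 7).sum with hqdef
      rw [hhit, hfold] at hd1
      obtain ⟨d, hd⟩ : ∃ d, hit? (n - q * (a.take 7).sum) (a.take 7) 0 1 = some d :=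
        hit?_isSome_of_mem _ _ 0 1 M hMmem (by omega)
      have hq_cast : ((q.toNat : Nat) : Int) = q := Int.toNat_of_nonneg (by omega)
      -- A side: skip q full weeks, then the final week exits at day d
      have hchain := loop_chain n a hlen7 q.toNat 0 (7 * (n.toNat + 2))
        (by omega) (by omega) ?_
      · have hqs_lt : q * (a.take 7).sum < n := by
          have e : q * (a.take 7).sum = (q - 1) * (a.take 7).sum + (a.take 7).sum := by ring
          linarith
        have hfin := loop_week n a (a.take 7) 0 ((0 : Int) + (q.toNat : Int) * (a.take 7).sum)
          (7 * (n.toNat + 2) - 7 * q.toNat) (by simp) (by simp)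
          (by omega) (by rw [hq_cast]; linarith)
        simp only [Nat.cast_zero, zero_add] at hfin
        have hshift : hit? n (a.take 7) ((q.toNat : Int) * (a.take 7).sum) 1 = some d := by
          rw [hit?_shift n ((q.toNat : Int) * (a.take 7).sum), hq_cast]
          rw [show q * (a.take 7).sum - q * (a.take 7).sum = (0 : Int) by ring]
          exact hd
        rw [hshift] at hfin
        unfold petrbook petrbook_alt
        rw [if_neg hn]
        simp only [hd1]
        rw [hchain]
        simp only [zero_add] at hfin ⊢
        rw [hfin]
        -- B side reduces to the same hit
        rw [show ((some M).getD 0 : Int) = M from rfl]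
        rw [bScan2_eq_hit?, ← hqdef, hd]
        rfl
      · intro k hk
        rw [hit?_shift n ((k : Int) * (a.take 7).sum)]
        rw [show (0 : Int) + (k : Int) * (a.take 7).sum - (k : Int) * (a.take 7).sum = 0 by ring]
        apply (hit?_none_iff _ _ _ _).mpr
        intro p hp
        have hpM := hMub p hp
        have hkq : (k : Int) ≤ q - 1 := by
          have hki : (k : Int) < ((q.toNat : Nat) : Int) := by exact_mod_cast hk
          omega
        have hmul : (k : Int) * (a.take 7).sum ≤ (q - 1) * (a.take 7).sum :=
          mul_le_mul_of_nonneg_right hkq hs.le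
        linarith

-- ===== VERDICT (by name: the statement is the Claim_ definition above) =====
theorem petrbook_spec : Claim_equal_petrbook := by
  intro n a _ hpre
  unfold Spec_petrbook
  exact main_eq n a hpre
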